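-- pv_equiv track=rewrite | github.com/jayrajmulani/recommendationSystem | item_item.py | A_Union_B
-- ===== SOURCE A (Python) =====
-- def A_Union_B (movieA,movieB,ratings):
--     rA = list(ratings[movieA].values())
--     rB = list(ratings[movieB].values())
--     cnt=0
--     for i in range(len(rA)):
--         if not rA[i] == 'NULL' or not rB[i] == 'NULL':
--             cnt+=1
--     return cnt
-- ===== SOURCE B (Python) =====
-- def A_Union_B(movieA, movieB, ratings):
--     rA = list(ratings[movieA].values())
--     rB = list(ratings[movieB].values())
--
--     def go(ra, rb):
--         # structural recursion on the rating lists instead of an index loop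
--         if not ra:
--             return 0
--         here = 1 if (ra[0] != 'NULL' or rb[0] != 'NULL') else 0
--         return here + go(ra[1:], rb[1:])
--
--     return go(rA, rB)
-- ===== Notes on version B (the rewrite author's own statement) =====
-- stated objective: alternative
-- what changed: B replaces A's index loop over range(len(rA)) with a structural recursion that walks the two rating lists, consuming one head per call and summing 1 for each position where either head is non-'NULL'; no indices or counter variable are maintained.
import Mathlib
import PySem

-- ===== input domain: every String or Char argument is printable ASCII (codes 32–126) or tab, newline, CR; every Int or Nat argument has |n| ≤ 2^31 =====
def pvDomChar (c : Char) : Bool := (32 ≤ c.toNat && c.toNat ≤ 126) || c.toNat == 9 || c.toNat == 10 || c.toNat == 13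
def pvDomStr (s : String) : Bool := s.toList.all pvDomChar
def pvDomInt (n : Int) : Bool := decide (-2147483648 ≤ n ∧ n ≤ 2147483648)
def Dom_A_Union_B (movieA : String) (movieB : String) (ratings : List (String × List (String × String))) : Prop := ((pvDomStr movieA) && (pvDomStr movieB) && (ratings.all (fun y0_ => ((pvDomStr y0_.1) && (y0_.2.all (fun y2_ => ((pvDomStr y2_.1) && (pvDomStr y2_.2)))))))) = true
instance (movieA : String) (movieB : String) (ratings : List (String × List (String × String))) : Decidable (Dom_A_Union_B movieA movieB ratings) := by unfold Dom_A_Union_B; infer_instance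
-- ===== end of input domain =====

-- B replaces A's index loop with a structural recursion over the two rating lists (no indices, no counter); alternative decomposition, same cost.


-- ===== PORT A =====
-- shared helper: list(ratings[k].values())  (both Pythons begin with these two identical lines)
def pvValues (ratings : List (String × List (String × String))) (k : String) : List String :=
  (PySem.Dict.ofList ((PySem.Dict.ofList ratings).getD k [])).values

def A_Union_B (movieA : String) (movieB : String) (ratings : List (String × List (String × String))) : Int :=
  let rA := pvValues ratings movieA
  let rB := pvValues ratings movieB
  (PySem.List.pyRange 0 (rA.length : Int) 1).foldl
    (fun cnt i =>
      if (!(PySem.List.pyGetD rA i "" == "NULL") || !(PySem.List.pyGetD rB i "" == "NULL")) then cnt + 1 else cnt)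
    0

-- ===== PORT B =====
-- go(ra, rb): structural recursion; rb[0] is read under Pre_ only when it exists (pyGetD default "" elsewhere)
def pvGo (ra rb : List String) : Int :=
  match ra with
  | [] => 0
  | a :: ta =>
    (if (!(a == "NULL") || !(PySem.List.pyGetD rb 0 "" == "NULL")) then 1 else 0) + pvGo ta (rb.drop 1)

def A_Union_B_alt (movieA : String) (movieB : String) (ratings : List (String × List (String × String))) : Int :=
  let rA := pvValues ratings movieA
  let rB := pvValues ratings movieB
  pvGo rA rB

-- ===== PRECONDITION & SPEC =====
-- Pre_ excludes exactly the inputs where Python A raises: a missing movie key (KeyError), or an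
-- index i < len(rA) with i >= len(rB) at which rA[i] == 'NULL' (the short-circuit then reads rB[i]: IndexError).
def Pre_A_Union_B (movieA : String) (movieB : String) (ratings : List (String × List (String × String))) : Prop :=
  (PySem.Dict.ofList ratings).contains movieA = true ∧
  (PySem.Dict.ofList ratings).contains movieB = true ∧
  ((pvValues ratings movieA).drop (pvValues ratings movieB).length).all (fun r => !(r == "NULL")) = true
instance (movieA : String) (movieB : String) (ratings : List (String × List (String × String))) : Decidable (Pre_A_Union_B movieA movieB ratings) := by unfold Pre_A_Union_B; infer_instance

def pvWitness_A_Union_B : String × String × (List (String × List (String × String))) :=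
  ("a", "b", [("a", [("u", "NULL"), ("v", "5")]), ("b", [("u", "3"), ("v", "NULL")])])

def Spec_A_Union_B (movieA : String) (movieB : String) (ratings : List (String × List (String × String))) (out : Int) : Prop := out = A_Union_B_alt movieA movieB ratings
instance (movieA : String) (movieB : String) (ratings : List (String × List (String × String))) (out : Int) : Decidable (Spec_A_Union_B movieA movieB ratings out) := by unfold Spec_A_Union_B; infer_instance

-- ===== CLAIM (what is proved, stated in full; the proofs are below) =====
def Claim_equal_A_Union_B : Prop := ∀ (movieA : String) (movieB : String) (ratings : List (String × List (String × String))), Dom_A_Union_B movieA movieB ratings → Pre_A_Union_B movieA movieB ratings → Spec_A_Union_B movieA movieB ratings (A_Union_B movieA movieB ratings)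

-- ===== LEMMAS AND PROOFS =====
lemma pv_getD_succ (rb : List String) (k : Nat) (d : String) :
    rb.getD (k + 1) d = (rb.drop 1).getD k d := by
  cases rb <;> simp

-- A's counting loop over List.range equals B's structural recursion.
lemma pv_range_fold_eq_go (ra : List String) :
    ∀ (rb : List String) (c : Int),
      (List.range ra.length).foldl
        (fun cnt k => if (!(ra.getD k "" == "NULL") || !(rb.getD k "" == "NULL")) then cnt + 1 else cnt) c
      = c + pvGo ra rb := by
  induction ra with
  | nil => intro rb c; simp [pvGo]
  | cons a ta ih =>
    intro rb c
    rw [List.length_cons, List.range_succ_eq_map, List.foldl_cons, List.foldl_map]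
    simp only [List.getD_cons_zero, List.getD_cons_succ, pv_getD_succ]
    rw [ih]
    simp only [pvGo, PySem.List.pyGetD_zero]
    split <;> omega

-- Bridge: A's fold over pyRange with Int indices is the List.range fold with Nat indices.
lemma pv_A_eq_range_fold (ra rb : List String) :
    (PySem.List.pyRange 0 (ra.length : Int) 1).foldl
      (fun cnt i => if (!(PySem.List.pyGetD ra i "" == "NULL") || !(PySem.List.pyGetD rb i "" == "NULL")) then cnt + 1 else cnt) 0
    = (List.range ra.length).foldl
      (fun cnt k => if (!(ra.getD k "" == "NULL") || !(rb.getD k "" == "NULL")) then cnt + 1 else cnt) (0 : Int) := by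
  rw [PySem.List.pyRange_one]
  simp only [Int.sub_zero, Int.toNat_natCast, List.foldl_map, Int.zero_add,
    PySem.List.pyGetD_natCast]

-- ===== VERDICT (by name: the statement is the Claim_ definition above) =====
theorem A_Union_B_spec : Claim_equal_A_Union_B := by
  intro movieA movieB ratings _ _
  unfold Spec_A_Union_B A_Union_B A_Union_B_alt
  simp only []
  exact (pv_A_eq_range_fold (pvValues ratings movieA) (pvValues ratings movieB)).trans
    (((pv_range_fold_eq_go (pvValues ratings movieA)) (pvValues ratings movieB) 0).trans
      (by simp))
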